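-- pv_equiv track=rewrite | github.com/cpkdb/AGIQA | data_generation/scripts/positive_prompt_backfill_executor.py | _chunk_count
-- ===== SOURCE A (Python) =====
-- from typing import Dict, Iterable, List, Optional
--
-- def _chunk_count(total: int, chunk_size: int) -> List[int]:
--     if total <= 0:
--         return []
--     chunks: List[int] = []
--     remaining = total
--     while remaining > 0:
--         current = min(chunk_size, remaining)
--         chunks.append(current)
--         remaining -= current
--     return chunks
-- ===== SOURCE B (Python) =====
-- def _chunk_count(total: int, chunk_size: int) -> list:
--     if total <= 0:
--         return []
--     q, r = divmod(total, chunk_size)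
--     return [chunk_size] * q + ([r] if r else [])
-- ===== Notes on version B (the rewrite author's own statement) =====
-- stated objective: simpler
-- what changed: Replaced the accumulating while-loop with a closed-form divmod: q full chunks plus the nonzero remainder.
import Mathlib
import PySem

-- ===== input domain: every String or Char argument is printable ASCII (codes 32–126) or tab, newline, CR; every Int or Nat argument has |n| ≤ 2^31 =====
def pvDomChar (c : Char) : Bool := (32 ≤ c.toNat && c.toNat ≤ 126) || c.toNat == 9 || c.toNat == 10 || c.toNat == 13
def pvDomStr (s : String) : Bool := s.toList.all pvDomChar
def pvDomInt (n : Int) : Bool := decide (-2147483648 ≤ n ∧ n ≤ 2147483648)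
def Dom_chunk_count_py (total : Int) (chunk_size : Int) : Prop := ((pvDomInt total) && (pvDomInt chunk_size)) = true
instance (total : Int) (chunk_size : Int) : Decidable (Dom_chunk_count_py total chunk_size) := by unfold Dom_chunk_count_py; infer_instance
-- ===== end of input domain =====

-- B replaces A's accumulating while-loop with a closed-form divmod (q full chunks plus the nonzero remainder); simpler, same result for chunk_size ≥ 1.


-- ===== PORT A =====
-- A's while-loop, fuel-bounded (the Python loop diverges when total > 0 and chunk_size ≤ 0; such inputs are outside Pre_, and on Pre_ the fuel total.toNat + 1 suffices).
def chunkLoopA (fuel : Nat) (chunk_size : Int) (remaining : Int) (chunks : List Int) : List Int :=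
  match fuel with
  | 0 => chunks
  | fuel + 1 =>
    if remaining > 0 then
      let current := min chunk_size remaining
      chunkLoopA fuel chunk_size (remaining - current) (chunks ++ [current])
    else chunks

def chunk_count_py (total : Int) (chunk_size : Int) : List Int :=
  if total ≤ 0 then []
  else chunkLoopA (total.toNat + 1) chunk_size total []

-- ===== PORT B =====
def chunk_count_py_alt (total : Int) (chunk_size : Int) : List Int :=
  if total ≤ 0 then []
  else
    let q := PySem.Int.floordiv total chunk_size
    let r := PySem.Int.mod total chunk_size
    List.replicate q.toNat chunk_size ++ (if r ≠ 0 then [r] else [])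

-- ===== PRECONDITION & SPEC =====
-- Pre_ excludes total > 0 with chunk_size ≤ 0: there A's while-loop never terminates (Python hangs), and B raises ZeroDivisionError (chunk_size = 0) or returns; A returns no value there.
def Pre_chunk_count_py (total : Int) (chunk_size : Int) : Prop := total ≤ 0 ∨ 1 ≤ chunk_size
instance (total : Int) (chunk_size : Int) : Decidable (Pre_chunk_count_py total chunk_size) := by unfold Pre_chunk_count_py; infer_instance
def pvWitness_chunk_count_py : Int × Int := (10, 3)

def Spec_chunk_count_py (total : Int) (chunk_size : Int) (out : List Int) : Prop := out = chunk_count_py_alt total chunk_size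
instance (total : Int) (chunk_size : Int) (out : List Int) : Decidable (Spec_chunk_count_py total chunk_size out) := by unfold Spec_chunk_count_py; infer_instance

-- ===== CLAIM (what is proved, stated in full; the proofs are below) =====
def Claim_equal_chunk_count_py : Prop := ∀ (total : Int) (chunk_size : Int), Dom_chunk_count_py total chunk_size → Pre_chunk_count_py total chunk_size → Spec_chunk_count_py total chunk_size (chunk_count_py total chunk_size)

-- ===== LEMMAS AND PROOFS =====

lemma chunkLoopA_zero (fuel : Nat) (cs : Int) (acc : List Int) :
    chunkLoopA fuel cs 0 acc = acc := by
  cases fuel <;> simp [chunkLoopA]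

lemma chunkLoopA_closed (cs : Int) (hcs : 1 ≤ cs) :
    ∀ (fuel : Nat) (r : Int) (acc : List Int), 0 < r → r.toNat ≤ fuel →
      chunkLoopA fuel cs r acc =
        acc ++ List.replicate (PySem.Int.floordiv r cs).toNat cs ++
          (if PySem.Int.mod r cs ≠ 0 then [PySem.Int.mod r cs] else []) := by
  intro fuel
  induction fuel with
  | zero => intro r acc hr hf; omega
  | succ n ih =>
    intro r acc hr hf
    simp only [chunkLoopA, if_pos hr]
    by_cases hle : cs ≤ r
    · have hmin : min cs r = cs := min_eq_left hle
      rw [hmin]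
      have hfd : PySem.Int.floordiv r cs = r / cs := PySem.Int.floordiv_eq_ediv_of_pos (by omega)
      have hmd : PySem.Int.mod r cs = r % cs := PySem.Int.mod_eq_emod_of_pos (by omega)
      by_cases hr0 : r - cs = 0
      · -- r = cs exactly: recursive call returns acc ++ [cs], and floordiv r cs = 1, mod = 0
        have : r = cs := by omega
        subst this
        have h1 : r / r = 1 := Int.ediv_self (by omega)
        have h2 : r % r = 0 := Int.emod_self
        rw [show r - r = (0 : Int) by ring, chunkLoopA_zero]
        simp [hfd, hmd, h1]
      · have hr' : 0 < r - cs := by omega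
        have hf' : (r - cs).toNat ≤ n := by omega
        rw [ih (r - cs) (acc ++ [cs]) hr' hf']
        have hfd' : PySem.Int.floordiv (r - cs) cs = (r - cs) / cs := PySem.Int.floordiv_eq_ediv_of_pos (by omega)
        have hmd' : PySem.Int.mod (r - cs) cs = (r - cs) % cs := PySem.Int.mod_eq_emod_of_pos (by omega)
        have hdiv : r / cs = (r - cs) / cs + 1 := by
          have h := Int.add_mul_ediv_right (r - cs) 1 (show cs ≠ 0 by omega)
          rw [one_mul] at h
          conv_lhs => rw [show r = r - cs + cs by ring]
          exact h
        have hmod : r % cs = (r - cs) % cs := by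
          conv_lhs => rw [show r = r - cs + cs * 1 by ring]
          exact Int.add_mul_emod_self_left _ _ _
        rw [hfd, hmd, hfd', hmd', hdiv, hmod]
        have hq : ((r - cs) / cs + 1).toNat = ((r - cs) / cs).toNat + 1 := by
          have h0 : 0 ≤ (r - cs) / cs := Int.ediv_nonneg (by omega) (by omega)
          omega
        rw [hq]
        simp [List.replicate_succ, List.append_assoc]
    · -- r < cs: current = r, next remaining = 0, loop returns acc ++ [r]
      have hmin : min cs r = r := min_eq_right (by omega)
      rw [hmin]
      have hfd : PySem.Int.floordiv r cs = r / cs := PySem.Int.floordiv_eq_ediv_of_pos (by omega)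
      have hmd : PySem.Int.mod r cs = r % cs := PySem.Int.mod_eq_emod_of_pos (by omega)
      have hdiv : r / cs = 0 := Int.ediv_eq_zero_of_lt (by omega) (by omega)
      have hmod : r % cs = r := Int.emod_eq_of_lt (by omega) (by omega)
      rw [show r - r = (0 : Int) by ring, chunkLoopA_zero]
      simp [hfd, hmd, hdiv, hmod, show r ≠ 0 by omega]

-- ===== VERDICT (by name: the statement is the Claim_ definition above) =====
theorem chunk_count_py_spec : Claim_equal_chunk_count_py := by
  intro total cs _ hpre
  unfold Spec_chunk_count_py chunk_count_py chunk_count_py_alt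
  by_cases ht : total ≤ 0
  · simp [ht]
  · have hcs : 1 ≤ cs := by
      rcases hpre with h | h
      · omega
      · exact h
    rw [if_neg ht, if_neg ht,
      chunkLoopA_closed cs hcs (total.toNat + 1) total [] (by omega) (by omega)]
    simp
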